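-- pv_equiv track=rewrite | github.com/verssionhack/pyjson2dataclass | src/field.py | _pack_field
-- ===== SOURCE A (Python) =====
-- from typing import List, Tuple, Optional, Self
--
-- def _pack_field(field: str, layers: List[str]):
--     '''
--         layers order: outer -> inner
--         e: to pack int as Optional[List[Dict[str, int]]]
--         input1: field = int, layers = Optional -> List -> Dict
--         input2: field = List[Dict[str, int]], layers = Optional
--         output: Optional[List[Dict[str, int]]]
--     '''
--     _layers, field, _ = _unpack_field(field)
--     layers.extend(_layers)
--     for layer in layers[::-1]:
--         if layer == 'Dict':
--             field = f'{layer}[str, {field}]'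
--         else:
--             field = f'{layer}[{field}]'
--     return field
--
-- def _unpack_field(field: str,
--                   deep: int = -1) -> Tuple[List[str], str, Optional[str]]:
--     '''
--         e.1
--         input: Optional[List[Dict[str, int]]], deep = -1
--         output: (Optional -> List -> Dict, int, None)
--         e.2
--         input: Optional[List[Dict[str, int]]], deep = 1
--         output: (Optional, List[Dict[str, int]], List)
--     '''
--     prefixs = [
--             'Optional[',
--             'List[',
--             'Dict[str, ',
--             ]
--     unpack_layers = []
--     while deep == -1 or deep > 0:
--         hit = False
--         for prefix in prefixs:
--             if field.startswith(prefix):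
--                 unpack_layers.append(prefix[:prefix.find('[')])
--                 field = field[len(prefix):-1]
--                 hit = True
--                 if deep > 0:
--                     deep -= 1
--                 if deep == 0:
--                     break
--         if not hit:
--             break
--     _n = [i[:i.find('[')] for i in prefixs if field.startswith(i)]
--     return (unpack_layers, field, _n[0] if _n else None)
-- ===== SOURCE B (Python) =====
-- # B: two-pointer scan -- walk the field with a start index and an end index instead of
-- # repeatedly slicing it (startswith at an offset, end shrinks by one per layer), take the
-- # core with ONE final slice, and assemble the result with a single join of the opening
-- # wrappers plus ']'*count; no reversed loop, no repeated string rewrapping, no copies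
-- # during the scan. Reproduces A's in-place layers.extend side effect.
-- _PAIRS = (('Optional[', 'Optional'), ('List[', 'List'), ('Dict[str, ', 'Dict'))
--
-- def _pack_field(field, layers):
--     i, end = 0, len(field)
--     _layers = []
--     while True:
--         for prefix, name in _PAIRS:
--             if end - i >= len(prefix) and field.startswith(prefix, i):
--                 _layers.append(name)
--                 i += len(prefix)
--                 end -= 1
--                 break
--         else:
--             break
--     core = field[i:end]
--     opens = ''.join('Dict[str, ' if n == 'Dict' else n + '['
--                     for n in layers + _layers)
--     result = opens + core + ']' * (len(layers) + len(_layers))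
--     layers.extend(_layers)
--     return result
-- ===== Notes on version B (the rewrite author's own statement) =====
-- stated objective: faster
-- what changed: B replaces A's unpack loop of repeated string slices (each pass copies the remaining string) and A's reversed rewrapping loop (each of the k wrap steps copies the whole growing string) by a two-pointer index scan over the original string with startswith-at-offset, one final slice for the core, and a single join of the opening wrappers plus ']'*count.
import Mathlib
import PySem

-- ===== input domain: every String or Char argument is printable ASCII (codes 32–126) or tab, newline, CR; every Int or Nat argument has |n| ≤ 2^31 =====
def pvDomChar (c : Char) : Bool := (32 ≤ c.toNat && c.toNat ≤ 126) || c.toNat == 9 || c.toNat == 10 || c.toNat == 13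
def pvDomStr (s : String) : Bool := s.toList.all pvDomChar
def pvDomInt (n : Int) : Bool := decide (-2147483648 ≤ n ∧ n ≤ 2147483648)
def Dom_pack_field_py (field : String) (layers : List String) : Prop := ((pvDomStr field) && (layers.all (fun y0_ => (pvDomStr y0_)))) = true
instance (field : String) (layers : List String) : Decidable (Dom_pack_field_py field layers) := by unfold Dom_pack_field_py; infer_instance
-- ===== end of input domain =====

-- B replaces A's repeated-slicing unpack loop and reversed rewrapping loop by a two-pointer
-- index scan over the original string (one final slice for the core) and a single flat
-- concatenation of the opening wrappers; return values proved equal everywhere (both Pythons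
-- also perform the identical layers.extend(_layers) in-place mutation, which the equivalence
-- is not about).

-- ===== PORT A =====
-- prefix[:prefix.find('[')]
def pvName (p : List Char) : List Char := p.takeWhile (· ≠ '[')
-- field[len(prefix):-1]
def pvStrip (p f : List Char) : List Char := (f.drop p.length).dropLast
-- one iteration of the inner 'for prefix in prefixs' body (deep is -1 at this call site, so the
-- 'deep' bookkeeping and its break are dead and omitted); state = (unpack_layers, field, hit)
def pvStep (p : List Char) (st : List (List Char) × List Char × Bool) :
    List (List Char) × List Char × Bool :=
  if p.isPrefixOf st.2.1 then (st.1 ++ [pvName p], pvStrip p st.2.1, true) else st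

def pvPrefixes : List (List Char) :=
  ["Optional[".toList, "List[".toList, "Dict[str, ".toList]

-- one pass of the for-loop over the three prefixes
def pvPass (acc : List (List Char)) (f : List Char) : List (List Char) × List Char × Bool :=
  pvPrefixes.foldl (fun st p => pvStep p st) (acc, f, false)

-- termination facts for the while loop (cited by pvUnpack's decreasing_by)
theorem pvFold_len_le (l : List (List Char)) :
    ∀ st : List (List Char) × List Char × Bool,
      (l.foldl (fun st p => pvStep p st) st).2.1.length ≤ st.2.1.length := by
  induction l with
  | nil => intro st; simp
  | cons q l ihl =>
    intro st
    simp only [List.foldl_cons]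
    refine (ihl _).trans ?_
    unfold pvStep
    split_ifs with h
    · have hle : q.length ≤ st.2.1.length := (List.isPrefixOf_iff_prefix.mp h).length_le
      simp only [pvStrip, List.length_dropLast, List.length_drop]
      omega
    · exact le_refl _

theorem pvFoldPass_len (l : List (List Char)) :
    ∀ st : List (List Char) × List Char × Bool, (∀ p ∈ l, p ≠ []) → st.2.2 = false →
      (l.foldl (fun st p => pvStep p st) st).2.2 = true →
      (l.foldl (fun st p => pvStep p st) st).2.1.length < st.2.1.length := by
  induction l with
  | nil => intro st _ h0 h1; simp at h1; simp [h1] at h0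
  | cons p ps ih =>
    intro st hne h0 hend
    simp only [List.foldl_cons] at hend ⊢
    by_cases h : p <+: st.2.1
    · have hstep : pvStep p st = (st.1 ++ [pvName p], pvStrip p st.2.1, true) := by
        simp [pvStep, h]
      have hlt : (pvStrip p st.2.1).length < st.2.1.length := by
        have hle : p.length ≤ st.2.1.length := h.length_le
        have hppos : 0 < p.length := List.length_pos_iff.mpr (hne p (by simp))
        simp only [pvStrip, List.length_dropLast, List.length_drop]
        omega
      calc (ps.foldl (fun st p => pvStep p st) (pvStep p st)).2.1.length
          ≤ (pvStep p st).2.1.length := pvFold_len_le ps _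
        _ = (pvStrip p st.2.1).length := by rw [hstep]
        _ < st.2.1.length := hlt
    · have hstep : pvStep p st = st := by simp [pvStep, h]
      rw [hstep] at hend ⊢
      exact ih st (fun q hq => hne q (List.mem_cons_of_mem _ hq)) h0 hend

theorem pvPass_len (acc : List (List Char)) (f : List Char) :
    (pvPass acc f).2.2 = true → (pvPass acc f).2.1.length < f.length := by
  intro h
  exact pvFoldPass_len pvPrefixes (acc, f, false) (by decide) rfl h

-- the 'while' loop of _unpack_field (deep = -1), returning (unpack_layers, field)
def pvUnpack (acc : List (List Char)) (f : List Char) : List (List Char) × List Char :=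
  let r := pvPass acc f
  if h : r.2.2 = true then pvUnpack r.1 r.2.1 else (acc, f)
termination_by f.length
decreasing_by exact pvPass_len acc f h

-- the body of 'for layer in layers[::-1]'
def pvWrapStep (f layer : List Char) : List Char :=
  if layer = "Dict".toList then "Dict[str, ".toList ++ f ++ [']']
  else layer ++ ['['] ++ f ++ [']']

def pack_field_py (field : String) (layers : List String) : String :=
  let r := pvUnpack [] field.toList
  -- layers.extend(_layers); then iterate layers[::-1] (= reverse)
  let allLayers := layers.map String.toList ++ r.1
  String.mk (allLayers.reverse.foldl pvWrapStep r.2)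

-- ===== PORT B =====
-- 'Dict[str, ' if n == 'Dict' else n + '['
def pvOpenB (n : List Char) : List Char :=
  if n = "Dict".toList then "Dict[str, ".toList else n ++ ['[']

-- Source B's while loop: two-pointer scan over the original string; field.startswith(prefix, i)
-- is ported by hand as prefix.isPrefixOf (f.drop i) (exact here: i is a non-negative index),
-- together with Source B's explicit end - i >= len(prefix) guard; state = (_layers, i, end)
def pvScan (f : List Char) (acc : List (List Char)) (i e : Nat) : List (List Char) × Nat × Nat :=
  if h9 : 9 ≤ e - i ∧ "Optional[".toList.isPrefixOf (f.drop i) then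
    pvScan f (acc ++ ["Optional".toList]) (i + 9) (e - 1)
  else if h5 : 5 ≤ e - i ∧ "List[".toList.isPrefixOf (f.drop i) then
    pvScan f (acc ++ ["List".toList]) (i + 5) (e - 1)
  else if h10 : 10 ≤ e - i ∧ "Dict[str, ".toList.isPrefixOf (f.drop i) then
    pvScan f (acc ++ ["Dict".toList]) (i + 10) (e - 1)
  else (acc, i, e)
termination_by e - i
decreasing_by
  · have := h9.1; omega
  · have := h5.1; omega
  · have := h10.1; omega

def pack_field_py_alt (field : String) (layers : List String) : String :=
  let f := field.toList
  let r := pvScan f [] 0 f.length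
  -- core = field[i:end]: hand port of the slice (both indices are non-negative Nats here)
  let core := (f.drop r.2.1).take (r.2.2 - r.2.1)
  let opens := ((layers.map String.toList ++ r.1).map pvOpenB).flatten
  String.mk (opens ++ core ++ List.replicate (layers.length + r.1.length) ']')

-- ===== PRECONDITION & SPEC =====
def Spec_pack_field_py (field : String) (layers : List String) (out : String) : Prop := out = pack_field_py_alt field layers
instance (field : String) (layers : List String) (out : String) : Decidable (Spec_pack_field_py field layers out) := by unfold Spec_pack_field_py; infer_instance

-- ===== CLAIM (what is proved, stated in full; the proofs are below) =====
def Claim_equal_pack_field_py : Prop := ∀ (field : String) (layers : List String), Dom_pack_field_py field layers → Spec_pack_field_py field layers (pack_field_py field layers)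

-- ===== LEMMAS AND PROOFS =====

-- proof-side single-strip recursion: the (names, core) both loops compute
def pvStripB (f : List Char) : List (List Char) × List Char :=
  if "Optional[".toList.isPrefixOf f then
    let r := pvStripB ((f.drop 9).dropLast)
    ("Optional".toList :: r.1, r.2)
  else if "List[".toList.isPrefixOf f then
    let r := pvStripB ((f.drop 5).dropLast)
    ("List".toList :: r.1, r.2)
  else if "Dict[str, ".toList.isPrefixOf f then
    let r := pvStripB ((f.drop 10).dropLast)
    ("Dict".toList :: r.1, r.2)
  else ([], f)
termination_by f.length
decreasing_by
  · have hle := List.IsPrefix.length_le (List.isPrefixOf_iff_prefix.mp (by assumption))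
    have h9 : ("Optional[".toList).length = 9 := rfl
    simp only [List.length_dropLast, List.length_drop]; omega
  · have hle := List.IsPrefix.length_le (List.isPrefixOf_iff_prefix.mp (by assumption))
    have h5 : ("List[".toList).length = 5 := rfl
    simp only [List.length_dropLast, List.length_drop]; omega
  · have hle := List.IsPrefix.length_le (List.isPrefixOf_iff_prefix.mp (by assumption))
    have h10 : ("Dict[str, ".toList).length = 10 := rfl
    simp only [List.length_dropLast, List.length_drop]; omega

-- the three prefixes are mutually exclusive (distinct first characters)
theorem pv_excl_OL (f : List Char) (h : "Optional[".toList <+: f) : ¬ "List[".toList <+: f := by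
  cases f with
  | nil => simp at h
  | cons a t =>
    rw [show "Optional[".toList = 'O' :: "ptional[".toList from rfl, List.cons_prefix_cons] at h
    rw [show "List[".toList = 'L' :: "ist[".toList from rfl, List.cons_prefix_cons]
    intro hc
    exact absurd (hc.1.trans h.1.symm) (by decide)
theorem pv_excl_OD (f : List Char) (h : "Optional[".toList <+: f) : ¬ "Dict[str, ".toList <+: f := by
  cases f with
  | nil => simp at h
  | cons a t =>
    rw [show "Optional[".toList = 'O' :: "ptional[".toList from rfl, List.cons_prefix_cons] at h
    rw [show "Dict[str, ".toList = 'D' :: "ict[str, ".toList from rfl, List.cons_prefix_cons]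
    intro hc
    exact absurd (hc.1.trans h.1.symm) (by decide)
theorem pv_excl_LD (f : List Char) (h : "List[".toList <+: f) : ¬ "Dict[str, ".toList <+: f := by
  cases f with
  | nil => simp at h
  | cons a t =>
    rw [show "List[".toList = 'L' :: "ist[".toList from rfl, List.cons_prefix_cons] at h
    rw [show "Dict[str, ".toList = 'D' :: "ict[str, ".toList from rfl, List.cons_prefix_cons]
    intro hc
    exact absurd (hc.1.trans h.1.symm) (by decide)

theorem pv_not_O_of_L (f : List Char) (h : "List[".toList <+: f) : ¬ "Optional[".toList <+: f :=
  fun hc => pv_excl_OL f hc h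
theorem pv_not_O_of_D (f : List Char) (h : "Dict[str, ".toList <+: f) : ¬ "Optional[".toList <+: f :=
  fun hc => pv_excl_OD f hc h
theorem pv_not_L_of_D (f : List Char) (h : "Dict[str, ".toList <+: f) : ¬ "List[".toList <+: f :=
  fun hc => pv_excl_LD f hc h

theorem pv_strip_len (p f : List Char) (hp : p ≠ []) (h : p <+: f) :
    (pvStrip p f).length < f.length := by
  have hle : p.length ≤ f.length := h.length_le
  have hppos : 0 < p.length := List.length_pos_iff.mpr hp
  simp only [pvStrip, List.length_dropLast, List.length_drop]
  omega

-- positive/negative behaviour of one for-body iteration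
theorem pvStep_pos (p : List Char) (acc : List (List Char)) (f : List Char) (hit : Bool)
    (h : p <+: f) : pvStep p (acc, f, hit) = (acc ++ [pvName p], pvStrip p f, true) := by
  simp [pvStep, h]
theorem pvStep_neg (p : List Char) (acc : List (List Char)) (f : List Char) (hit : Bool)
    (h : ¬ p <+: f) : pvStep p (acc, f, hit) = (acc, f, hit) := by
  simp [pvStep, h]

-- the two exits of the while loop
theorem pvUnpack_rec (acc : List (List Char)) (f : List Char)
    (acc' : List (List Char)) (f' : List Char)
    (h : pvPass acc f = (acc', f', true)) : pvUnpack acc f = pvUnpack acc' f' := by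
  rw [pvUnpack]
  simp [h]

theorem pvUnpack_done (acc : List (List Char)) (f : List Char)
    (acc' : List (List Char)) (f' : List Char)
    (h : pvPass acc f = (acc', f', false)) : pvUnpack acc f = (acc, f) := by
  rw [pvUnpack]
  simp [h]

-- literal evaluations
theorem pvName_O : pvName ['O','p','t','i','o','n','a','l','['] = ['O','p','t','i','o','n','a','l'] := by decide
theorem pvName_L : pvName ['L','i','s','t','['] = ['L','i','s','t'] := by decide
theorem pvName_D : pvName ['D','i','c','t','[','s','t','r',',',' '] = ['D','i','c','t'] := by decide

-- unfolding equations for the strip recursion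
theorem pvStripB_O (f : List Char) (h : "Optional[".toList <+: f) :
    pvStripB f = ("Optional".toList :: (pvStripB (pvStrip "Optional[".toList f)).1,
                  (pvStripB (pvStrip "Optional[".toList f)).2) := by
  rw [pvStripB, if_pos (List.isPrefixOf_iff_prefix.mpr h)]
  exact rfl
theorem pvStripB_L (f : List Char) (hO : ¬ "Optional[".toList <+: f)
    (h : "List[".toList <+: f) :
    pvStripB f = ("List".toList :: (pvStripB (pvStrip "List[".toList f)).1,
                  (pvStripB (pvStrip "List[".toList f)).2) := by
  rw [pvStripB, if_neg (fun hc => hO (List.isPrefixOf_iff_prefix.mp hc)),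
    if_pos (List.isPrefixOf_iff_prefix.mpr h)]
  exact rfl
theorem pvStripB_D (f : List Char) (hO : ¬ "Optional[".toList <+: f)
    (hL : ¬ "List[".toList <+: f) (h : "Dict[str, ".toList <+: f) :
    pvStripB f = ("Dict".toList :: (pvStripB (pvStrip "Dict[str, ".toList f)).1,
                  (pvStripB (pvStrip "Dict[str, ".toList f)).2) := by
  rw [pvStripB, if_neg (fun hc => hO (List.isPrefixOf_iff_prefix.mp hc)),
    if_neg (fun hc => hL (List.isPrefixOf_iff_prefix.mp hc)),
    if_pos (List.isPrefixOf_iff_prefix.mpr h)]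
  exact rfl
theorem pvStripB_none (f : List Char) (hO : ¬ "Optional[".toList <+: f)
    (hL : ¬ "List[".toList <+: f) (hD : ¬ "Dict[str, ".toList <+: f) :
    pvStripB f = ([], f) := by
  rw [pvStripB, if_neg (fun hc => hO (List.isPrefixOf_iff_prefix.mp hc)),
    if_neg (fun hc => hL (List.isPrefixOf_iff_prefix.mp hc)),
    if_neg (fun hc => hD (List.isPrefixOf_iff_prefix.mp hc))]

-- A's pass-based while loop computes exactly the single-strip recursion's (names, core)
theorem pvUnpack_eq_stripB (f : List Char) (acc : List (List Char)) :
    pvUnpack acc f = (acc ++ (pvStripB f).1, (pvStripB f).2) := by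
  generalize hn : f.length = n
  induction n using Nat.strong_induction_on generalizing f acc with
  | _ n ih =>
  subst hn
  have hpass : pvPass acc f =
      pvStep "Dict[str, ".toList (pvStep "List[".toList (pvStep "Optional[".toList (acc, f, false))) := by
    simp [pvPass, pvPrefixes]
  by_cases hO : "Optional[".toList <+: f
  · have l1 := pv_strip_len "Optional[".toList f (by decide) hO
    rw [pvStripB_O f hO]
    by_cases hL1 : "List[".toList <+: pvStrip "Optional[".toList f
    · have hO1 := pv_not_O_of_L _ hL1
      have l2 := pv_strip_len "List[".toList _ (by decide) hL1
      rw [pvStripB_L _ hO1 hL1]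
      by_cases hD2 : "Dict[str, ".toList <+: pvStrip "List[".toList (pvStrip "Optional[".toList f)
      · have l3 := pv_strip_len "Dict[str, ".toList _ (by decide) hD2
        rw [pvStripB_D _ (pv_not_O_of_D _ hD2) (pv_not_L_of_D _ hD2) hD2]
        have hp : pvPass acc f = (acc ++ [pvName "Optional[".toList] ++ [pvName "List[".toList] ++ [pvName "Dict[str, ".toList],
            pvStrip "Dict[str, ".toList (pvStrip "List[".toList (pvStrip "Optional[".toList f)), true) := by
          rw [hpass, pvStep_pos _ _ _ _ hO, pvStep_pos _ _ _ _ hL1, pvStep_pos _ _ _ _ hD2]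
        rw [pvUnpack_rec _ _ _ _ hp, ih _ (l3.trans (l2.trans l1)) _ _ rfl]
        simp [pvName_O, pvName_L, pvName_D]
      · have hp : pvPass acc f = (acc ++ [pvName "Optional[".toList] ++ [pvName "List[".toList],
            pvStrip "List[".toList (pvStrip "Optional[".toList f), true) := by
          rw [hpass, pvStep_pos _ _ _ _ hO, pvStep_pos _ _ _ _ hL1, pvStep_neg _ _ _ _ hD2]
        rw [pvUnpack_rec _ _ _ _ hp, ih _ (l2.trans l1) _ _ rfl]
        simp [pvName_O, pvName_L]
    · by_cases hD1 : "Dict[str, ".toList <+: pvStrip "Optional[".toList f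
      · have hO1 := pv_not_O_of_D _ hD1
        have l2 := pv_strip_len "Dict[str, ".toList _ (by decide) hD1
        rw [pvStripB_D _ hO1 hL1 hD1]
        have hp : pvPass acc f = (acc ++ [pvName "Optional[".toList] ++ [pvName "Dict[str, ".toList],
            pvStrip "Dict[str, ".toList (pvStrip "Optional[".toList f), true) := by
          rw [hpass, pvStep_pos _ _ _ _ hO, pvStep_neg _ _ _ _ hL1, pvStep_pos _ _ _ _ hD1]
        rw [pvUnpack_rec _ _ _ _ hp, ih _ (l2.trans l1) _ _ rfl]
        simp [pvName_O, pvName_D]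
      · have hp : pvPass acc f = (acc ++ [pvName "Optional[".toList],
            pvStrip "Optional[".toList f, true) := by
          rw [hpass, pvStep_pos _ _ _ _ hO, pvStep_neg _ _ _ _ hL1, pvStep_neg _ _ _ _ hD1]
        rw [pvUnpack_rec _ _ _ _ hp, ih _ l1 _ _ rfl]
        simp [pvName_O]
  · by_cases hL : "List[".toList <+: f
    · have l1 := pv_strip_len "List[".toList f (by decide) hL
      rw [pvStripB_L f hO hL]
      by_cases hD1 : "Dict[str, ".toList <+: pvStrip "List[".toList f
      · have l2 := pv_strip_len "Dict[str, ".toList _ (by decide) hD1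
        rw [pvStripB_D _ (pv_not_O_of_D _ hD1) (pv_not_L_of_D _ hD1) hD1]
        have hp : pvPass acc f = (acc ++ [pvName "List[".toList] ++ [pvName "Dict[str, ".toList],
            pvStrip "Dict[str, ".toList (pvStrip "List[".toList f), true) := by
          rw [hpass, pvStep_neg _ _ _ _ hO, pvStep_pos _ _ _ _ hL, pvStep_pos _ _ _ _ hD1]
        rw [pvUnpack_rec _ _ _ _ hp, ih _ (l2.trans l1) _ _ rfl]
        simp [pvName_L, pvName_D]
      · have hp : pvPass acc f = (acc ++ [pvName "List[".toList], pvStrip "List[".toList f, true) := by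
          rw [hpass, pvStep_neg _ _ _ _ hO, pvStep_pos _ _ _ _ hL, pvStep_neg _ _ _ _ hD1]
        rw [pvUnpack_rec _ _ _ _ hp, ih _ l1 _ _ rfl]
        simp [pvName_L]
    · by_cases hD : "Dict[str, ".toList <+: f
      · have l1 := pv_strip_len "Dict[str, ".toList f (by decide) hD
        rw [pvStripB_D f hO hL hD]
        have hp : pvPass acc f = (acc ++ [pvName "Dict[str, ".toList], pvStrip "Dict[str, ".toList f, true) := by
          rw [hpass, pvStep_neg _ _ _ _ hO, pvStep_neg _ _ _ _ hL, pvStep_pos _ _ _ _ hD]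
        rw [pvUnpack_rec _ _ _ _ hp, ih _ l1 _ _ rfl]
        simp [pvName_D]
      · have hp : pvPass acc f = (acc, f, false) := by
          rw [hpass, pvStep_neg _ _ _ _ hO, pvStep_neg _ _ _ _ hL, pvStep_neg _ _ _ _ hD]
        rw [pvUnpack_done _ _ _ _ hp, pvStripB_none f hO hL hD]
        simp

-- the guard 'end - i >= len(prefix) and startswith(prefix, i)' holds iff the prefix
-- starts the current remaining string field[i:end]
theorem pvCond9 (f : List Char) (i e : Nat) :
    (9 ≤ e - i ∧ "Optional[".toList.isPrefixOf (f.drop i)) ↔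
      "Optional[".toList <+: (f.drop i).take (e - i) := by
  rw [List.prefix_take_iff, List.isPrefixOf_iff_prefix,
    show ("Optional[".toList).length = 9 from rfl]
  tauto
theorem pvCond5 (f : List Char) (i e : Nat) :
    (5 ≤ e - i ∧ "List[".toList.isPrefixOf (f.drop i)) ↔
      "List[".toList <+: (f.drop i).take (e - i) := by
  rw [List.prefix_take_iff, List.isPrefixOf_iff_prefix,
    show ("List[".toList).length = 5 from rfl]
  tauto
theorem pvCond10 (f : List Char) (i e : Nat) :
    (10 ≤ e - i ∧ "Dict[str, ".toList.isPrefixOf (f.drop i)) ↔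
      "Dict[str, ".toList <+: (f.drop i).take (e - i) := by
  rw [List.prefix_take_iff, List.isPrefixOf_iff_prefix,
    show ("Dict[str, ".toList).length = 10 from rfl]
  tauto

-- advancing the two pointers = stripping prefix and last char of the remaining string
theorem pvSlice_step (f : List Char) (i e k : Nat) (he : e ≤ f.length) :
    (f.drop (i + k)).take ((e - 1) - (i + k)) = (((f.drop i).take (e - i)).drop k).dropLast := by
  rw [List.drop_take, List.drop_drop, List.dropLast_eq_take, List.take_take,
    List.length_take, List.length_drop]
  congr 1
  omega

-- the two-pointer scan computes stripB's names, and its final (i, end) slice is stripB's core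
theorem pvScan_eq (f : List Char) (n : Nat) : ∀ (i e : Nat) (acc : List (List Char)),
    e - i ≤ n → e ≤ f.length →
    (pvScan f acc i e).1 = acc ++ (pvStripB ((f.drop i).take (e - i))).1 ∧
    (f.drop (pvScan f acc i e).2.1).take ((pvScan f acc i e).2.2 - (pvScan f acc i e).2.1)
      = (pvStripB ((f.drop i).take (e - i))).2 := by
  induction n with
  | zero =>
    intro i e acc hn he
    have h0 : e - i = 0 := Nat.le_zero.mp hn
    rw [pvScan]
    rw [dif_neg (by omega : ¬ (9 ≤ e - i ∧ "Optional[".toList.isPrefixOf (f.drop i))),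
      dif_neg (by omega : ¬ (5 ≤ e - i ∧ "List[".toList.isPrefixOf (f.drop i))),
      dif_neg (by omega : ¬ (10 ≤ e - i ∧ "Dict[str, ".toList.isPrefixOf (f.drop i)))]
    rw [pvStripB_none _ (by rw [← pvCond9]; omega) (by rw [← pvCond5]; omega)
      (by rw [← pvCond10]; omega)]
    simp
  | succ n ih =>
    intro i e acc hn he
    rw [pvScan]
    by_cases h9 : 9 ≤ e - i ∧ "Optional[".toList.isPrefixOf (f.drop i)
    · rw [dif_pos h9]
      have hpre : "Optional[".toList <+: (f.drop i).take (e - i) := (pvCond9 f i e).mp h9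
      have hstep : (f.drop (i + 9)).take ((e - 1) - (i + 9)) =
          pvStrip "Optional[".toList ((f.drop i).take (e - i)) :=
        pvSlice_step f i e 9 he
      obtain ⟨ha, hb⟩ := ih (i + 9) (e - 1) (acc ++ ["Optional".toList]) (by omega) (by omega)
      rw [hstep] at ha hb
      rw [pvStripB_O _ hpre]
      exact ⟨by rw [ha]; simp, hb⟩
    · rw [dif_neg h9]
      have hO : ¬ "Optional[".toList <+: (f.drop i).take (e - i) := by rw [← pvCond9]; exact h9
      by_cases h5 : 5 ≤ e - i ∧ "List[".toList.isPrefixOf (f.drop i)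
      · rw [dif_pos h5]
        have hpre : "List[".toList <+: (f.drop i).take (e - i) := (pvCond5 f i e).mp h5
        have hstep : (f.drop (i + 5)).take ((e - 1) - (i + 5)) =
            pvStrip "List[".toList ((f.drop i).take (e - i)) :=
          pvSlice_step f i e 5 he
        obtain ⟨ha, hb⟩ := ih (i + 5) (e - 1) (acc ++ ["List".toList]) (by omega) (by omega)
        rw [hstep] at ha hb
        rw [pvStripB_L _ hO hpre]
        exact ⟨by rw [ha]; simp, hb⟩
      · rw [dif_neg h5]
        have hL : ¬ "List[".toList <+: (f.drop i).take (e - i) := by rw [← pvCond5]; exact h5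
        by_cases h10 : 10 ≤ e - i ∧ "Dict[str, ".toList.isPrefixOf (f.drop i)
        · rw [dif_pos h10]
          have hpre : "Dict[str, ".toList <+: (f.drop i).take (e - i) := (pvCond10 f i e).mp h10
          have hstep : (f.drop (i + 10)).take ((e - 1) - (i + 10)) =
              pvStrip "Dict[str, ".toList ((f.drop i).take (e - i)) :=
            pvSlice_step f i e 10 he
          obtain ⟨ha, hb⟩ := ih (i + 10) (e - 1) (acc ++ ["Dict".toList]) (by omega) (by omega)
          rw [hstep] at ha hb
          rw [pvStripB_D _ hO hL hpre]
          exact ⟨by rw [ha]; simp, hb⟩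
        · rw [dif_neg h10]
          have hD : ¬ "Dict[str, ".toList <+: (f.drop i).take (e - i) := by
            rw [← pvCond10]; exact h10
          rw [pvStripB_none _ hO hL hD]
          simp

-- one wrapping step = one opening wrapper, the inner string, one ']'
theorem pvWrapStep_open (f l : List Char) : pvWrapStep f l = pvOpenB l ++ f ++ [']'] := by
  unfold pvWrapStep pvOpenB
  split_ifs <;> simp

-- A's reversed wrapping fold = B's flat concatenation opens ++ core ++ closes
theorem pvFold_eq_flat (L : List (List Char)) (core : List Char) :
    L.reverse.foldl pvWrapStep core = (L.map pvOpenB).flatten ++ core ++ List.replicate L.length ']' := by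
  induction L with
  | nil => simp
  | cons a L ih =>
    rw [List.reverse_cons, List.foldl_append]
    simp only [List.foldl_cons, List.foldl_nil, ih, pvWrapStep_open]
    simp [List.replicate_succ' (n := L.length)]

-- ===== VERDICT (by name: the statement is the Claim_ definition above) =====
theorem pack_field_py_spec : Claim_equal_pack_field_py := by
  intro field layers _
  unfold Spec_pack_field_py pack_field_py pack_field_py_alt
  obtain ⟨h1, h2⟩ := pvScan_eq field.toList field.toList.length 0 field.toList.length []
    (by omega) (by omega)
  simp only [List.drop_zero, Nat.sub_zero, List.take_length] at h1 h2
  simp only [pvUnpack_eq_stripB, List.nil_append, pvFold_eq_flat, h1, h2]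
  simp
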